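-- pv_equiv track=rewrite | github.com/biz-ops-dev/tailor_resume | src/tailor_resume/notes_rules.py | validate_notes_placement
-- ===== SOURCE A (Python) =====
-- def validate_notes_placement(md: str) -> list[str]:
--   lines = md.splitlines()
--   errors: list[str] = []
--   in_summary = False
--
--   def is_h2(line: str) -> bool:
--     return line.startswith("## ")
--
--   def is_bullet(line: str) -> bool:
--     return line.startswith("- ") or line.startswith("* ")
--
--   def is_blockquote(line: str) -> bool:
--     return line.lstrip().startswith(">")
--
--   def is_html_comment(line: str) -> bool:
--     return line.lstrip().startswith("<!--")
--
--   for i, line in enumerate(lines):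
--     if is_h2(line):
--       section = line[3:].strip().lower()
--       in_summary = (section == "summary")
--       continue
--
--     if in_summary:
--       continue
--
--     if is_blockquote(line):
--       j = i - 1
--       blanks = 0
--       while j >= 0 and lines[j].strip() == "":
--         blanks += 1
--         j -= 1
--       if blanks > 1:
--         errors.append(f"Line {i+1}: blockquote is separated from bullet by >1 blank line.")
--       if j < 0 or not is_bullet(lines[j]):
--         errors.append(f"Line {i+1}: blockquote must follow a bullet ('- ' or '* ').")
--       continue
--
--     if is_html_comment(line):
--       errors.append(f"Line {i+1}: HTML comment found outside SUMMARY (did stripping run?).")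
--
--   return errors
-- ===== SOURCE B (Python) =====
-- def validate_notes_placement(md: str) -> list[str]:
--   errors: list[str] = []
--   in_summary = False
--   blank_run = 0            # consecutive blank lines just seen
--   prev_nonblank = None     # last non-blank line seen, or None
--
--   def is_h2(line: str) -> bool:
--     return line.startswith("## ")
--
--   def is_bullet(line: str) -> bool:
--     return line.startswith("- ") or line.startswith("* ")
--
--   def is_blockquote(line: str) -> bool:
--     return line.lstrip().startswith(">")
--
--   def is_html_comment(line: str) -> bool:
--     return line.lstrip().startswith("<!--")
--
--   for i, line in enumerate(md.splitlines()):
--     if is_h2(line):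
--       in_summary = line[3:].strip().lower() == "summary"
--     elif not in_summary:
--       if is_blockquote(line):
--         if blank_run > 1:
--           errors.append(f"Line {i+1}: blockquote is separated from bullet by >1 blank line.")
--         if prev_nonblank is None or not is_bullet(prev_nonblank):
--           errors.append(f"Line {i+1}: blockquote must follow a bullet ('- ' or '* ').")
--       elif is_html_comment(line):
--         errors.append(f"Line {i+1}: HTML comment found outside SUMMARY (did stripping run?).")
--     if line.strip() == "":
--       blank_run += 1
--     else:
--       blank_run = 0
--       prev_nonblank = line
--   return errors
-- ===== Notes on version B (the rewrite author's own statement) =====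
-- stated objective: faster
-- what changed: Replaces the inner backward while-scan at every blockquote with a single forward pass maintaining two accumulators (blank_run and prev_nonblank), removing the O(n) re-scan per blockquote line (O(n^2) worst case becomes O(n)).
import Mathlib
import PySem

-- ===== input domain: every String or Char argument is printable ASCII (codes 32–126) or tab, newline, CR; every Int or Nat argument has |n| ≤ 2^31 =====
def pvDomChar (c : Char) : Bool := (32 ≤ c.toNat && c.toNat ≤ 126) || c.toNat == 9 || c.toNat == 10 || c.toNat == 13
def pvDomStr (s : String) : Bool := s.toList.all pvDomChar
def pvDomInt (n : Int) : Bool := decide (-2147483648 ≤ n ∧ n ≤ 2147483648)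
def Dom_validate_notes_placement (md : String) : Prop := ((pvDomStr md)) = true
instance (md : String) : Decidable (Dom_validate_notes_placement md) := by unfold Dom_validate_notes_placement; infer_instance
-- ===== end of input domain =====

-- B replaces A's per-blockquote backward while-scan by a single forward pass carrying two
-- accumulators (blank_run, prev_nonblank), removing the inner loop.

-- ===== PORT A =====
-- shared line predicates (A and B define the same four helpers)
def pvIsH2 (l : String) : Bool := PySem.Str.startswith l "## "
def pvIsBullet (l : String) : Bool := PySem.Str.startswith l "- " || PySem.Str.startswith l "* "
def pvIsBlockquote (l : String) : Bool := PySem.Str.startswith (PySem.Str.lstrip l) ">"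
def pvIsHtmlComment (l : String) : Bool := PySem.Str.startswith (PySem.Str.lstrip l) "<!--"
def pvBlank (l : String) : Bool := PySem.Str.strip l == ""
def pvMsgSep (i : Int) : String := "Line " ++ PySem.Int.toStr (i+1) ++ ": blockquote is separated from bullet by >1 blank line."
def pvMsgBullet (i : Int) : String := "Line " ++ PySem.Int.toStr (i+1) ++ ": blockquote must follow a bullet ('- ' or '* ')."
def pvMsgComment (i : Int) : String := "Line " ++ PySem.Int.toStr (i+1) ++ ": HTML comment found outside SUMMARY (did stripping run?)."

-- A's inner `while j >= 0 and lines[j].strip() == "":` loop; the index j is always < len(lines),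
-- so `(pyGet? …).getD ""` is exact (the default is never taken while 0 ≤ j).
def pvScanBack (lines : List String) (j : Int) (blanks : Int) : Int × Int :=
  if h : 0 ≤ j ∧ pvBlank ((PySem.List.pyGet? lines j).getD "") = true then
    pvScanBack lines (j - 1) (blanks + 1)
  else (blanks, j)
termination_by (j + 1).toNat
decreasing_by omega

-- A's `for i, line in enumerate(lines)` with the index carried explicitly
def pvALoop (lines : List String) : List String → Int → Bool → List String → List String
  | [], _, _, errors => errors
  | line :: rest, i, insum, errors =>
    if pvIsH2 line then
      pvALoop lines rest (i + 1)
        (PySem.Str.lower (PySem.Str.strip (PySem.Str.slice line (some 3) none)) == "summary") errors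
    else if insum then pvALoop lines rest (i + 1) insum errors
    else if pvIsBlockquote line then
      let r := pvScanBack lines (i - 1) 0
      let e1 := if r.1 > 1 then errors ++ [pvMsgSep i] else errors
      let e2 := if r.2 < 0 || !pvIsBullet ((PySem.List.pyGet? lines r.2).getD "") then
                  e1 ++ [pvMsgBullet i] else e1
      pvALoop lines rest (i + 1) insum e2
    else if pvIsHtmlComment line then pvALoop lines rest (i + 1) insum (errors ++ [pvMsgComment i])
    else pvALoop lines rest (i + 1) insum errors

def validate_notes_placement (md : String) : List String :=
  pvALoop (PySem.Str.splitlines md) (PySem.Str.splitlines md) 0 false []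

-- ===== PORT B =====
-- `prev_nonblank is None or not is_bullet(prev_nonblank)`
def pvPrevNotBullet : Option String → Bool
  | none => true
  | some p => !pvIsBullet p

-- single forward pass; state: index i, in_summary, blank_run, prev_nonblank, errors
def pvBLoop : List String → Int → Bool → Int → Option String → List String → List String
  | [], _, _, _, _, errors => errors
  | line :: rest, i, insum, blankRun, prevNonblank, errors =>
    let st :=
      if pvIsH2 line then
        ((PySem.Str.lower (PySem.Str.strip (PySem.Str.slice line (some 3) none)) == "summary"), errors)
      else if !insum then
        if pvIsBlockquote line then
          let e1 := if blankRun > 1 then errors ++ [pvMsgSep i] else errors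
          let e2 := if pvPrevNotBullet prevNonblank then e1 ++ [pvMsgBullet i] else e1
          (insum, e2)
        else if pvIsHtmlComment line then (insum, errors ++ [pvMsgComment i])
        else (insum, errors)
      else (insum, errors)
    if pvBlank line then pvBLoop rest (i + 1) st.1 (blankRun + 1) prevNonblank st.2
    else pvBLoop rest (i + 1) st.1 0 (some line) st.2

def validate_notes_placement_alt (md : String) : List String :=
  pvBLoop (PySem.Str.splitlines md) 0 false 0 none []

-- ===== PRECONDITION & SPEC =====
def Spec_validate_notes_placement (md : String) (out : List String) : Prop := out = validate_notes_placement_alt md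
instance (md : String) (out : List String) : Decidable (Spec_validate_notes_placement md out) := by unfold Spec_validate_notes_placement; infer_instance

-- ===== CLAIM (what is proved, stated in full; the proofs are below) =====
def Claim_equal_validate_notes_placement : Prop := ∀ (md : String), Dom_validate_notes_placement md → Spec_validate_notes_placement md (validate_notes_placement md)

-- ===== LEMMAS AND PROOFS =====

-- invariant for B's (blank_run, prev_nonblank) state over the processed prefix of length n
def pvInv2 (L : List String) (n : Nat) (br : Int) (pn : Option String) : Prop :=
  (pn = none → br = (n : Int)) ∧
  (∀ s, pn = some s →
    0 ≤ (n : Int) - 1 - br ∧ PySem.List.pyGet? L ((n : Int) - 1 - br) = some s ∧ pvBlank s = false)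

lemma pvScanBack_acc (L : List String) :
    ∀ (n : Nat) (j b : Int), (j + 1).toNat = n →
      pvScanBack L j b = ((pvScanBack L j 0).1 + b, (pvScanBack L j 0).2) := by
  intro n
  induction n using Nat.strong_induction_on with
  | _ n ih =>
    intro j b hn
    conv_lhs => rw [pvScanBack]
    conv_rhs => rw [pvScanBack]
    split_ifs with h
    · have h1 := ih (j - 1 + 1).toNat (by omega) (j - 1) (b + 1) rfl
      have h2 := ih (j - 1 + 1).toNat (by omega) (j - 1) (0 + 1) rfl
      rw [h1, h2]
      simp; ring
    · simp

lemma pvMain :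
    ∀ (rest p : List String) (insum : Bool) (br : Int) (pn : Option String) (errs : List String),
      pvScanBack (p ++ rest) ((p.length : Int) - 1) 0 = (br, (p.length : Int) - 1 - br) →
      pvInv2 (p ++ rest) p.length br pn →
      pvALoop (p ++ rest) rest (p.length : Int) insum errs = pvBLoop rest (p.length : Int) insum br pn errs := by
  intro rest
  induction rest with
  | nil => intro p insum br pn errs _ _; simp [pvALoop, pvBLoop]
  | cons line rest' ih =>
    intro p insum br pn errs hscan hinv
    have hget : PySem.List.pyGet? (p ++ line :: rest') (p.length : Int) = some line := by
      rw [PySem.List.pyGet?_natCast]; simp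
    have hlen : ((p ++ [line]).length : Int) = (p.length : Int) + 1 := by simp
    have hassoc : (p ++ [line]) ++ rest' = p ++ line :: rest' := by simp
    -- maintenance of the backward-scan characterisation
    have hscan' : pvScanBack (p ++ line :: rest') ((p.length : Int) + 1 - 1) 0 =
        (if pvBlank line then br + 1 else 0,
         (p.length : Int) + 1 - 1 - (if pvBlank line then br + 1 else 0)) := by
      have he : (p.length : Int) + 1 - 1 = (p.length : Int) := by ring
      rw [he, pvScanBack]
      by_cases hb : pvBlank line = true
      · rw [dif_pos ⟨Int.natCast_nonneg _, by rw [hget]; simpa⟩]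
        rw [pvScanBack_acc _ ((p.length : Int) - 1 + 1).toNat _ _ rfl, hscan]
        simp [hb]; ring
      · rw [dif_neg (by rw [hget]; simp [hb])]
        simp [hb]
    -- maintenance of the (blank_run, prev_nonblank) invariant
    have hinv' : pvInv2 (p ++ line :: rest') (p ++ [line]).length
        (if pvBlank line then br + 1 else 0)
        (if pvBlank line then pn else some line) := by
      by_cases hb : pvBlank line = true
      · simp only [hb, if_true]
        obtain ⟨hn, hsm⟩ := hinv
        constructor
        · intro he; have := hn he; simp [this]
        · intro s hs
          obtain ⟨h1, h2, h3⟩ := hsm s hs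
          refine ⟨by simp; omega, ?_, h3⟩
          have he : ((p ++ [line]).length : Int) - 1 - (br + 1) = (p.length : Int) - 1 - br := by
            simp; ring
          rw [he, h2]
      · simp only [hb, Bool.false_eq_true, if_false]
        constructor
        · intro he; exact absurd he (by simp)
        · intro s hs
          have hsl : s = line := by simpa using hs.symm
          rw [hsl]
          refine ⟨by simp, ?_, by simpa using hb⟩
          have he : ((p ++ [line]).length : Int) - 1 - 0 = (p.length : Int) := by simp
          rw [he, hget]
    -- one recursive step, for any continuation state
    have step : ∀ (insum2 : Bool) (errs2 : List String),
        pvALoop (p ++ line :: rest') rest' ((p.length : Int) + 1) insum2 errs2 =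
        pvBLoop rest' ((p.length : Int) + 1) insum2 (if pvBlank line then br + 1 else 0)
          (if pvBlank line then pn else some line) errs2 := by
      intro insum2 errs2
      have := ih (p ++ [line]) insum2 (if pvBlank line then br + 1 else 0)
        (if pvBlank line then pn else some line) errs2
        (by rw [hassoc, hlen]; exact hscan') (by rw [hassoc]; exact hinv')
      rw [hassoc, hlen] at this
      exact this
    -- agreement of the emitted errors in the blockquote branch
    have hbq : (decide ((p.length : Int) - 1 - br < 0) ||
          !pvIsBullet ((PySem.List.pyGet? (p ++ line :: rest') ((p.length : Int) - 1 - br)).getD "")) =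
        pvPrevNotBullet pn := by
      obtain ⟨hn, hsm⟩ := hinv
      cases pn with
      | none =>
        have hlt : (p.length : Int) - 1 - br < 0 := by have := hn rfl; omega
        simp [hlt, pvPrevNotBullet]
      | some s =>
        obtain ⟨hh1, hh2, hh3⟩ := hsm s rfl
        have hlt : ¬ ((p.length : Int) - 1 - br < 0) := by omega
        simp only [hh2, Option.getD_some]
        simp [hlt, pvPrevNotBullet]
    -- now take the step on both sides
    simp only [pvALoop, pvBLoop]
    by_cases hb : pvBlank line = true <;>
      simp only [hb, if_true, Bool.false_eq_true, if_false] at step ⊢ <;>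
    · by_cases h2 : pvIsH2 line = true
      · simp only [h2, if_true]
        exact step _ errs
      · simp only [h2, Bool.false_eq_true, if_false]
        by_cases hs : insum = true
        · simp only [hs, if_true, Bool.not_true, Bool.false_eq_true, if_false]
          exact step _ errs
        · simp only [hs, Bool.false_eq_true, if_false, Bool.not_false, if_true]
          by_cases hq : pvIsBlockquote line = true
          · simp only [hq, if_true, hscan, hbq]
            exact step _ _
          · simp only [hq, Bool.false_eq_true, if_false]
            by_cases hc : pvIsHtmlComment line = true <;>
              simp only [hc, if_true, Bool.false_eq_true, if_false] <;> exact step _ _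

-- ===== VERDICT (by name: the statement is the Claim_ definition above) =====
theorem validate_notes_placement_spec : Claim_equal_validate_notes_placement := by
  intro md _
  unfold Spec_validate_notes_placement validate_notes_placement validate_notes_placement_alt
  have h1 : pvScanBack (PySem.Str.splitlines md) ((([] : List String).length : Int) - 1) 0 =
      (0, (([] : List String).length : Int) - 1 - 0) := by
    rw [pvScanBack]; simp
  have h2 : pvInv2 (PySem.Str.splitlines md) ([] : List String).length 0 none := by
    simp [pvInv2]
  have := pvMain (PySem.Str.splitlines md) [] false 0 none [] (by simpa using h1) (by simpa using h2)
  simpa using this
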